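/- GENERATED by mk_final_copies.py from the proof of the farm's unit `crc32_init` (farm:crc32_init.1: Proof.lean) as the
   re-elaboration sweep compiled it — do not edit. -/
import Asan.CheckWalk
import Vorbis.Spec.Units.crc32_init

open X86 X86.User Asan Vorbis

set_option maxRecDepth 4000
set_option maxHeartbeats 4000000

namespace Vorbis.Spec.crc32_init

/-- The low 32 bits of a small counter held in a 64-bit register, as a number. -/
theorem part32_ofNat (n : Nat) (h : n < 2 ^ 32) : (Word.part Width.w32 (UInt64.ofNat n)).toNat = n := by
  unfold Word.part
  simp only [Width.bits, BitVec.toNat_setWidth, UInt64.toNat_toBitVec, UInt64.toNat_ofNat']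
  omega

/-- The low 32 bits of a small counter, read as a signed number. -/
theorem part32_ofNat_toInt (n : Nat) (h : n < 2 ^ 31) : (Word.part Width.w32 (UInt64.ofNat n)).toInt = (n : Int) := by
  have h1 := part32_ofNat n (by omega)
  rw [Vorbis.Spec.toInt_of_lt _ (by omega), h1]

/-- `movsxd` of a small counter is the counter. -/
theorem sext_ofNat (n : Nat) (h : n < 2 ^ 31) :
    Word.ofBV (BitVec.signExtend 64 (Word.part Width.w32 (UInt64.ofNat n))) = UInt64.ofNat n := by
  have h1 := part32_ofNat n (by omega)
  apply UInt64.toNat_inj.mp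
  rw [Vorbis.Spec.toNat_sext32 _ (by omega), h1]
  simp only [UInt64.toNat_ofNat']
  omega

/-- `add r32, 1` on a small counter is the next counter. -/
theorem succ_ofNat (n : Nat) (h : n + 1 < 2 ^ 32) :
    Word.ofBV (Word.part Width.w32 (UInt64.ofNat n) + 1#32) = UInt64.ofNat (n + 1) := by
  have h1 := part32_ofNat n (by omega)
  apply UInt64.toNat_inj.mp
  unfold Word.ofBV
  simp only [UInt64.toNat_ofNat', UInt64.toNat_ofBitVec, BitVec.toNat_setWidth, BitVec.toNat_add,
    BitVec.toNat_ofNat, Width.bits] at h1 ⊢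
  omega

/-- A `jg` not taken after `cmp r32, c` on a small counter: the counter is at most `c`. -/
theorem le_of_not_jg (n : Nat) (c : BitVec 32) (hn : n < 2 ^ 31) (hc : c.toNat < 2 ^ 31)
    (h : ¬ c.toInt < (Word.part Width.w32 (UInt64.ofNat n)).toInt) : n ≤ c.toNat := by
  rw [part32_ofNat_toInt n hn, Vorbis.Spec.toInt_of_lt c hc] at h
  omega

/-- The address of `crc_table[i]`, as a number. -/
theorem slot_toNat (i : Nat) (h : i < 256) : (UInt64.ofNat i * 4 + 1186816).toNat = 1186816 + 4 * i := by
  simp only [UInt64.toNat_add, UInt64.toNat_mul, UInt64.toNat_ofNat']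
  have e4 : (4 : UInt64).toNat = 4 := rfl
  have e5 : (1186816 : UInt64).toNat = 1186816 := rfl
  rw [e4, e5]
  omega

end Vorbis.Spec.crc32_init


/-- `crc32_init` satisfies its contract: two NESTED counted loops. The outer loop (head 0x103ee3, `for (i = 0; i < 256; i++)`,
counter `ebp`) is set up by `u_loop [i]` without a postcondition; inside its body the inner loop (head 0x103eb5,
`for (j = 0; j < 8; ++j)`, counter `eax`, no store) is set up by `u_loop [j]`, again without a postcondition, so its body is
walked through its exit, the one check call and the store `crc_table[i] = s`, to the outer back edge (`Or.inl` of the inner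
target = the outer target, there `Or.inr`: the outer invariant for `i + 1`). -/
theorem Vorbis.Spec.Worked.crc32_init_ok : Vorbis.Spec.crc32_init.Statement := by
  intro Lay hLay μ hμ u₀ hcode hstore4 others frames u ret he hpre
  v_entry he
  obtain ⟨hsh, hlive⟩ := hpre
  have hsp := hsh.rsp
  -- 0x103ea0 … 0x103ea9: three pushes, `i = 0`, the jump to the outer loop's head
  u_walk hcode [hμ.vendor] until [Vorbis.L.crc32_init.loop2] span [Vorbis.L.textLo, Vorbis.L.textHi] side (v_side)
  -- the head of the outer loop (0x103ee3, stb_vorbis_fixed.c:1023): `ebp = i ≤ 256`; the memory is replaced by what stays true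
  obtain ⟨i, hi, hile⟩ : ∃ i : Nat, s_103ea9.reg .rbp = UInt64.ofNat i ∧ i ≤ 256 :=
    ⟨0, w_rbp, Nat.zero_le _⟩
  have hsame : Mem.SameExcept [⟨(u.reg .rsp).toNat - 48, (u.reg .rsp).toNat⟩,
      ⟨0x121c00, 0x121c00 + 1024⟩] u.mem s_103ea9.mem := by
    u_same
  have hun : ShadowUntouched u.mem s_103ea9.mem := by v_untouched
  have hs1 : UInt64.ofNat (s_103ea9.mem.readLE (u.reg .rsp - 8) 8) = u.reg .r12 := by u_resolve
  have hs2 : UInt64.ofNat (s_103ea9.mem.readLE (u.reg .rsp - 16) 8) = u.reg .rbp := by u_resolve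
  have hs3 : UInt64.ofNat (s_103ea9.mem.readLE (u.reg .rsp - 24) 8) = u.reg .rbx := by u_resolve
  have hs0 : UInt64.ofNat (s_103ea9.mem.readLE (u.reg .rsp) 8) = ret := by u_resolve
  have hdf : s_103ea9.flags .df = false := by
    rw [w_flags]
    exact he_df
  replace w_kept := w_kept.mono_all (S' := [.rbp, .rsp, .rbx, .r12, .rax, .rcx, .rdx, .rdi]) (by rfl)
  clear w_mem w_flags w_rbp
  u_loop [i] (fun v => 256 - (v.reg .rbp).toNat)
  u_walk hcode [hμ.vendor] until [Vorbis.L.crc32_init.loop2, Vorbis.L.crc32_init.loop1] span [Vorbis.L.textLo, Vorbis.L.textHi] side (v_side)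
  · -- the exit of the outer loop (i > 255), walked to the `ret`
    refine ReachVia.done (Or.inl ?_)
    v_returned
    show ShadowUntouched u.mem s_103efb.mem
    rw [w_mem]
    exact hun
  · -- the head of the inner loop (0x103eb5, stb_vorbis_fixed.c:1024): `i ≤ 255`, `eax = j ≤ 8`, `ebx` (= s) is anything;
    -- the loop stores nothing: `w_mem : s.mem = s_103ea9.mem` stays
    have hi255 : i ≤ 255 := Vorbis.Spec.crc32_init.le_of_not_jg i 255#32 (by omega) (by decide) hbr_103ee9
    obtain ⟨j, hj, hjle⟩ : ∃ j : Nat, s_103ef5.reg .rax = UInt64.ofNat j ∧ j ≤ 8 :=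
      ⟨0, w_rax, Nat.zero_le _⟩
    have hdf' : s_103ef5.flags .df = false := by
      rw [w_flags]
      simp only [X86.User.df_setStatus]
      exact hdf
    clear w_flags w_rax w_rbx
    u_loop [j] (fun v => 8 - (v.reg .rax).toNat)
    u_walk hcode [hμ.vendor] until [Vorbis.L.crc32_init.loop2, Vorbis.L.crc32_init.loop1] span [Vorbis.L.textLo, Vorbis.L.textHi] side (v_side)
    · -- check_103ed3 (0x103ed3, `crc_table[i] = s`): the four bytes lie inside `crc_table`; no store went to the shadow
      have hun' : ShadowUntouched u.mem s_103ed3.mem := by v_untouched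
      have haddr := Vorbis.Spec.crc32_init.slot_toNat i (by omega)
      rw [Vorbis.Spec.crc32_init.sext_ofNat i (by omega)]
      refine hlive.accSmall hsh.inv hun' _ 4 (by decide) ?_ ?_
      · simp only [Vorbis.Globals.crc_table]
        omega
      · simp only [Vorbis.Globals.crc_table]
        omega
    · -- side_code: the store to `crc_table[i]` misses the text
      have haddr := Vorbis.Spec.crc32_init.slot_toNat i (by omega)
      rw [Vorbis.Spec.crc32_init.sext_ofNat i (by omega)]
      omega
    · -- the back edge of the outer loop (0x103ee0 → 0x103ee3): the outer invariant for `i + 1`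
      have haddr := Vorbis.Spec.crc32_init.slot_toNat i (by omega)
      rw [Vorbis.Spec.crc32_init.sext_ofNat i (by omega)] at w_mem w_r12 w_rdi w_acc_103ed3
      refine ReachVia.done (Or.inl ?_)
      refine Or.inr ⟨⟨i + 1, w_rip, w_rsp, w_eq, w_mxcsr, ?_, ?_, ?_, ?_, ?_, ?_, ?_, ?_, ?_, w_kept⟩, ?_⟩
      · rw [w_rbp]
        exact Vorbis.Spec.crc32_init.succ_ofNat i (by omega)
      · omega
      · u_same
      · v_untouched
      · u_frame hs1
      · u_frame hs2
      · u_frame hs3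
      · u_frame hs0
      · rw [w_flags]
        simp only [X86.User.df_setStatus]
        exact w_df_103ed3
      · rw [w_rbp, Vorbis.Spec.crc32_init.succ_ofNat i (by omega)]
        u_omega
    · -- the back edge of the inner loop (0x103eb2 → 0x103eb5), `s >= (1U<<31)`: the inner invariant for `j + 1`
      have hj7 : j ≤ 7 := Vorbis.Spec.crc32_init.le_of_not_jg j 7#32 (by omega) (by decide) hbr_103eb8
      u_loop_back [j + 1]
      · rw [w_rax]
        exact Vorbis.Spec.crc32_init.succ_ofNat j (by omega)
      · omega
      · rw [w_flags]
        simp only [X86.User.df_setStatus]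
        exact hdf'
      · rw [w_rax, Vorbis.Spec.crc32_init.succ_ofNat j (by omega)]
        u_omega
    · -- the back edge of the inner loop (0x103eb2 → 0x103eb5), `s < (1U<<31)`: the same
      have hj7 : j ≤ 7 := Vorbis.Spec.crc32_init.le_of_not_jg j 7#32 (by omega) (by decide) hbr_103eb8
      u_loop_back [j + 1]
      · rw [w_rax]
        exact Vorbis.Spec.crc32_init.succ_ofNat j (by omega)
      · omega
      · rw [w_flags]
        simp only [X86.User.df_setStatus]
        exact hdf'
      · rw [w_rax, Vorbis.Spec.crc32_init.succ_ofNat j (by omega)]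
        u_omega
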